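-- pv_equiv track=rewrite | github.com/Dieterdemuynck/Informatica5 | 12b - Roosters/Kleurendriehoek.py | kleuren
-- ===== SOURCE A (Python) =====
-- def kleuren(driehoek):
--     g = 0
--     y = 0
--     r = 0
--     for i in range(len(driehoek)):
--         for j in range(len(driehoek[i])):
--             if driehoek[i][j] == "G":
--                 g += 1
--             elif driehoek[i][j] == "R":
--                 r += 1
--             elif driehoek[i][j] == "Y":
--                 y += 1
--
--     return g, r, y
-- ===== SOURCE B (Python) =====
-- def kleuren(driehoek):
--     g = sum(row.count("G") for row in driehoek)
--     r = sum(row.count("R") for row in driehoek)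
--     y = sum(row.count("Y") for row in driehoek)
--     return g, r, y
-- ===== Notes on version B (the rewrite author's own statement) =====
-- stated objective: idiomatic
-- what changed: Replaces the single index-driven double loop with if/elif branches by three per-color sums of row.count over the rows, iterating rows directly.
import Mathlib
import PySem

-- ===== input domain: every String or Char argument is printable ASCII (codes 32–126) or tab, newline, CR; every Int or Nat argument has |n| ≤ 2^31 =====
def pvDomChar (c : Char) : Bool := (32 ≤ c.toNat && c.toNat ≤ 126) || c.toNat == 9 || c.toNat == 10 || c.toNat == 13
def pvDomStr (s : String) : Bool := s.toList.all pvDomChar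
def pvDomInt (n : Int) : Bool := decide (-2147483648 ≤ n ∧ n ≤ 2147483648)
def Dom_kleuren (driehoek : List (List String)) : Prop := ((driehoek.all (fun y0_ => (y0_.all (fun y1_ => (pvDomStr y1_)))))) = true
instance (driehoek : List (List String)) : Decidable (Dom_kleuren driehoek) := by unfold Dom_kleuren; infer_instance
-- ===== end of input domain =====

-- B replaces A's index-driven double loop with if/elif branches by three per-color sums of row.count; same cost, plainer code.

-- ===== PORT A =====
-- state is (g, y, r) in the declaration order of A; A returns (g, r, y).
-- indexing driehoek[i] / driehoek[i][j] via pyGetD: all indices produced by range(len(...)) are in range.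
def kleurenStep (s : Int × Int × Int) (c : String) : Int × Int × Int :=
  if c == "G" then (s.1 + 1, s.2.1, s.2.2)
  else if c == "R" then (s.1, s.2.1, s.2.2 + 1)
  else if c == "Y" then (s.1, s.2.1 + 1, s.2.2)
  else s

def kleuren (driehoek : List (List String)) : Int × Int × Int :=
  let st := (PySem.List.pyRange 0 driehoek.length 1).foldl
    (fun (s : Int × Int × Int) i =>
      let row := PySem.List.pyGetD driehoek i []
      (PySem.List.pyRange 0 row.length 1).foldl
        (fun (s : Int × Int × Int) j => kleurenStep s (PySem.List.pyGetD row j ""))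
        s)
    ((0, 0, 0) : Int × Int × Int)
  (st.1, st.2.2, st.2.1)

-- ===== PORT B =====
def kleuren_alt (driehoek : List (List String)) : Int × Int × Int :=
  ((driehoek.map (fun row => (PySem.List.count row "G" : Int))).sum,
   (driehoek.map (fun row => (PySem.List.count row "R" : Int))).sum,
   (driehoek.map (fun row => (PySem.List.count row "Y" : Int))).sum)

-- ===== PRECONDITION & SPEC =====
def Spec_kleuren (driehoek : List (List String)) (out : Int × Int × Int) : Prop := out = kleuren_alt driehoek
instance (driehoek : List (List String)) (out : Int × Int × Int) : Decidable (Spec_kleuren driehoek out) := by unfold Spec_kleuren; infer_instance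

-- ===== CLAIM (what is proved, stated in full; the proofs are below) =====
def Claim_equal_kleuren : Prop := ∀ (driehoek : List (List String)), Dom_kleuren driehoek → Spec_kleuren driehoek (kleuren driehoek)

-- ===== LEMMAS AND PROOFS =====

theorem kleuren_inner (row : List String) (g y r : Int) :
    row.foldl kleurenStep (g, y, r) =
      (g + PySem.List.count row "G", y + PySem.List.count row "Y", r + PySem.List.count row "R") := by
  induction row generalizing g y r with
  | nil => simp [PySem.List.count]
  | cons c t ih =>
    simp only [List.foldl_cons, kleurenStep, PySem.List.count_eq]
    by_cases hG : c = "G"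
    · subst hG; simp [ih, PySem.List.count_eq]; ring_nf
    · by_cases hR : c = "R"
      · subst hR; simp [ih, PySem.List.count_eq]; ring_nf
      · by_cases hY : c = "Y"
        · subst hY; simp [ih, PySem.List.count_eq]; ring_nf
        · simp [hG, hR, hY, ih, PySem.List.count_eq]

theorem kleuren_outer (d : List (List String)) (g y r : Int) :
    d.foldl (fun s row => row.foldl kleurenStep s) (g, y, r) =
      (g + (d.map (fun row => (PySem.List.count row "G" : Int))).sum,
       y + (d.map (fun row => (PySem.List.count row "Y" : Int))).sum,
       r + (d.map (fun row => (PySem.List.count row "R" : Int))).sum) := by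
  induction d generalizing g y r with
  | nil => simp
  | cons row t ih =>
    simp only [List.foldl_cons, kleuren_inner, List.map_cons, List.sum_cons, ih]
    ring_nf

-- ===== VERDICT (by name: the statement is the Claim_ definition above) =====
theorem kleuren_spec : Claim_equal_kleuren := by
  intro d _
  show kleuren d = kleuren_alt d
  unfold kleuren kleuren_alt
  simp only [PySem.List.foldl_pyRange_zero_pyGetD']
  simp only [kleuren_outer]
  simp
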